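-- pv_equiv track=rewrite | github.com/ssatanis/oski | rubrics-to-prompts/backend/backend.py | generate_examples_for_text
-- ===== SOURCE A (Python) =====
-- from typing import List, Dict, Any
--
-- def generate_examples_for_text(text: str) -> List[str]:
--     """Generate contextually relevant examples based on the criterion text"""
--     text_lower = text.lower()
--
--     # Medical-specific example generation
--     if any(word in text_lower for word in ['wash', 'hand', 'hygiene', 'clean']):
--         return ["I will wash my hands before examining you", "Let me clean my hands", "Hand hygiene is important"]
--
--     if any(word in text_lower for word in ['inspect', 'look', 'visual', 'examine']):
--         return ["I'm going to examine this area visually", "Let me take a closer look", "I need to inspect this carefully"]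
--
--     if any(word in text_lower for word in ['introduce', 'greet', 'name']):
--         return ["Hello, I'm Dr. Smith", "May I introduce myself?", "I'll be your doctor today"]
--
--     if any(word in text_lower for word in ['consent', 'permission', 'okay']):
--         return ["Is it okay if I examine you?", "Do I have your permission?", "May I proceed with the examination?"]
--
--     if any(word in text_lower for word in ['skin', 'dermat', 'rash', 'lesion']):
--         return ["I'm going to examine your skin", "Let me look at this area", "I need to check your skin condition"]
--
--     if any(word in text_lower for word in ['pain', 'comfort', 'hurt']):
--         return ["Does this hurt?", "Let me know if you feel any discomfort", "Rate your pain on a scale of 1-10"]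
--
--     # Generic medical examples
--     return [
--         f"Assessment related to {text.lower()}",
--         f"I will evaluate {text.lower()}",
--         f"Let me check {text.lower()}"
--     ]
-- ===== SOURCE B (Python) =====
-- _KEYWORD_GROUP = {
--     'wash': 0, 'hand': 0, 'hygiene': 0, 'clean': 0,
--     'inspect': 1, 'look': 1, 'visual': 1, 'examine': 1,
--     'introduce': 2, 'greet': 2, 'name': 2,
--     'consent': 3, 'permission': 3, 'okay': 3,
--     'skin': 4, 'dermat': 4, 'rash': 4, 'lesion': 4,
--     'pain': 5, 'comfort': 5, 'hurt': 5,
-- }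
--
-- _EXAMPLES = [
--     ["I will wash my hands before examining you", "Let me clean my hands", "Hand hygiene is important"],
--     ["I'm going to examine this area visually", "Let me take a closer look", "I need to inspect this carefully"],
--     ["Hello, I'm Dr. Smith", "May I introduce myself?", "I'll be your doctor today"],
--     ["Is it okay if I examine you?", "Do I have your permission?", "May I proceed with the examination?"],
--     ["I'm going to examine your skin", "Let me look at this area", "I need to check your skin condition"],
--     ["Does this hurt?", "Let me know if you feel any discomfort", "Rate your pain on a scale of 1-10"],
-- ]
--
-- def generate_examples_for_text(text: str):
--     # Text-driven single scan: walk the text once and, at each position, note any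
--     # keyword starting there, keeping the smallest (highest-priority) group index.
--     tl = text.lower()
--     best = 6
--     for i in range(len(tl)):
--         for kw, g in _KEYWORD_GROUP.items():
--             if g < best and tl.startswith(kw, i):
--                 best = g
--     if best < 6:
--         return _EXAMPLES[best]
--     return [
--         f"Assessment related to {tl}",
--         f"I will evaluate {tl}",
--         f"Let me check {tl}",
--     ]
-- ===== Notes on version B (the rewrite author's own statement) =====
-- stated objective: alternative
-- what changed: Inverts the traversal: instead of A's keyword-driven cascade of six any(word in text) branches with early returns, B scans the lowered text position by position, records via startswith the smallest group index of any keyword beginning there (a min accumulator, no early return), and indexes an examples table with that minimum; the fallback f-strings are produced when no keyword ever matched.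
import Mathlib
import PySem

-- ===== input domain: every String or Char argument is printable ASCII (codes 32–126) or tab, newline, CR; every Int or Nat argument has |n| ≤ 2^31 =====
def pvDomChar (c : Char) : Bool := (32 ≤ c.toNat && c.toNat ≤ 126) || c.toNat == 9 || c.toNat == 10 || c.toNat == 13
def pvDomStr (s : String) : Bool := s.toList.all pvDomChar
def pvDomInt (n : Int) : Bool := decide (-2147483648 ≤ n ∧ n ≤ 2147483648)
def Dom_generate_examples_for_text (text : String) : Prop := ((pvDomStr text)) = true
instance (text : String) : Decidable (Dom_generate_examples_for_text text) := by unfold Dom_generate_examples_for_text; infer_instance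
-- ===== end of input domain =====

-- B inverts A's keyword-driven branch cascade into a single text-driven scan: it walks the
-- lowered text position by position, keeps the minimum group index of any keyword starting
-- there, and indexes an examples table with that minimum (objective: alternative).

-- ===== PORT A =====
def generate_examples_for_text (text : String) : List String :=
  let text_lower := PySem.Str.lower text
  if ["wash", "hand", "hygiene", "clean"].any (fun word => PySem.Str.isIn word text_lower) then
    ["I will wash my hands before examining you", "Let me clean my hands", "Hand hygiene is important"]
  else if ["inspect", "look", "visual", "examine"].any (fun word => PySem.Str.isIn word text_lower) then
    ["I'm going to examine this area visually", "Let me take a closer look", "I need to inspect this carefully"]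
  else if ["introduce", "greet", "name"].any (fun word => PySem.Str.isIn word text_lower) then
    ["Hello, I'm Dr. Smith", "May I introduce myself?", "I'll be your doctor today"]
  else if ["consent", "permission", "okay"].any (fun word => PySem.Str.isIn word text_lower) then
    ["Is it okay if I examine you?", "Do I have your permission?", "May I proceed with the examination?"]
  else if ["skin", "dermat", "rash", "lesion"].any (fun word => PySem.Str.isIn word text_lower) then
    ["I'm going to examine your skin", "Let me look at this area", "I need to check your skin condition"]
  else if ["pain", "comfort", "hurt"].any (fun word => PySem.Str.isIn word text_lower) then
    ["Does this hurt?", "Let me know if you feel any discomfort", "Rate your pain on a scale of 1-10"]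
  else
    ["Assessment related to " ++ PySem.Str.lower text,
     "I will evaluate " ++ PySem.Str.lower text,
     "Let me check " ++ PySem.Str.lower text]

-- ===== PORT B =====
-- Source B's _KEYWORD_GROUP dict (insertion order) as an association list
def pvKeywordGroup : List (String × Nat) :=
  [("wash", 0), ("hand", 0), ("hygiene", 0), ("clean", 0),
   ("inspect", 1), ("look", 1), ("visual", 1), ("examine", 1),
   ("introduce", 2), ("greet", 2), ("name", 2),
   ("consent", 3), ("permission", 3), ("okay", 3),
   ("skin", 4), ("dermat", 4), ("rash", 4), ("lesion", 4),
   ("pain", 5), ("comfort", 5), ("hurt", 5)]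

def pvExamples : List (List String) :=
  [["I will wash my hands before examining you", "Let me clean my hands", "Hand hygiene is important"],
   ["I'm going to examine this area visually", "Let me take a closer look", "I need to inspect this carefully"],
   ["Hello, I'm Dr. Smith", "May I introduce myself?", "I'll be your doctor today"],
   ["Is it okay if I examine you?", "Do I have your permission?", "May I proceed with the examination?"],
   ["I'm going to examine your skin", "Let me look at this area", "I need to check your skin condition"],
   ["Does this hurt?", "Let me know if you feel any discomfort", "Rate your pain on a scale of 1-10"]]

-- inner loop of Source B: one position i; tl.startswith(kw, i) is exact as
-- PySem.Chars.startswith (cs.drop i) kw.toList since 0 ≤ i < len(tl)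
def pvScanStep (cs : List Char) (best : Nat) (i : Nat) : Nat :=
  pvKeywordGroup.foldl
    (fun b kg => if kg.2 < b ∧ PySem.Chars.startswith (cs.drop i) kg.1.toList then kg.2 else b)
    best

def generate_examples_for_text_alt (text : String) : List String :=
  let tl := PySem.Str.lower text
  let best := (List.range tl.toList.length).foldl (pvScanStep tl.toList) 6
  if best < 6 then
    pvExamples.getD best []
  else
    ["Assessment related to " ++ tl,
     "I will evaluate " ++ tl,
     "Let me check " ++ tl]

-- ===== PRECONDITION & SPEC =====
def Spec_generate_examples_for_text (text : String) (out : List String) : Prop := out = generate_examples_for_text_alt text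
instance (text : String) (out : List String) : Decidable (Spec_generate_examples_for_text text out) := by unfold Spec_generate_examples_for_text; infer_instance

-- ===== CLAIM (what is proved, stated in full; the proofs are below) =====
def Claim_equal_generate_examples_for_text : Prop := ∀ (text : String), Dom_generate_examples_for_text text → Spec_generate_examples_for_text text (generate_examples_for_text text)

-- ===== LEMMAS AND PROOFS =====
-- A's six keyword lists, indexed by group
def pvGroupWords : Nat → List String
  | 0 => ["wash", "hand", "hygiene", "clean"]
  | 1 => ["inspect", "look", "visual", "examine"]
  | 2 => ["introduce", "greet", "name"]
  | 3 => ["consent", "permission", "okay"]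
  | 4 => ["skin", "dermat", "rash", "lesion"]
  | 5 => ["pain", "comfort", "hurt"]
  | _ => []

def pvCond (cs : List Char) (j : Nat) : Bool :=
  (pvGroupWords j).any (fun w => PySem.Chars.isIn w.toList cs)

-- inner fold never increases the accumulator
lemma pvInner_le (cs : List Char) (i : Nat) (l : List (String × Nat)) (b : Nat) :
    l.foldl (fun b kg => if kg.2 < b ∧ PySem.Chars.startswith (cs.drop i) kg.1.toList then kg.2 else b) b ≤ b := by
  induction l generalizing b with
  | nil => simp
  | cons x l ih =>
    simp only [List.foldl_cons]
    refine le_trans (ih _) ?_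
    split <;> omega

lemma pvInner_le_of_mem (cs : List Char) (i : Nat) (l : List (String × Nat)) (b : Nat)
    (kg : String × Nat) (hmem : kg ∈ l)
    (hp : PySem.Chars.startswith (cs.drop i) kg.1.toList = true) :
    l.foldl (fun b kg => if kg.2 < b ∧ PySem.Chars.startswith (cs.drop i) kg.1.toList then kg.2 else b) b ≤ kg.2 := by
  induction l generalizing b with
  | nil => cases hmem
  | cons x l ih =>
    simp only [List.foldl_cons]
    rcases List.mem_cons.mp hmem with h | h
    · subst h
      refine le_trans (pvInner_le cs i l _) ?_
      by_cases h : kg.2 < b ∧ PySem.Chars.startswith (cs.drop i) kg.1.toList = true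
      · rw [if_pos h]
      · rw [if_neg h]
        simp only [hp, and_true] at h
        omega
    · exact ih _ h

lemma pvInner_cases (cs : List Char) (i : Nat) (l : List (String × Nat)) (b : Nat) :
    l.foldl (fun b kg => if kg.2 < b ∧ PySem.Chars.startswith (cs.drop i) kg.1.toList then kg.2 else b) b = b ∨
    ∃ kg ∈ l, l.foldl (fun b kg => if kg.2 < b ∧ PySem.Chars.startswith (cs.drop i) kg.1.toList then kg.2 else b) b = kg.2 ∧
      PySem.Chars.startswith (cs.drop i) kg.1.toList = true := by
  induction l generalizing b with
  | nil => left; simp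
  | cons x l ih =>
    simp only [List.foldl_cons]
    by_cases h : x.2 < b ∧ PySem.Chars.startswith (cs.drop i) x.1.toList = true
    · rw [if_pos h]
      rcases ih x.2 with h' | ⟨kg, hmem, heq, hp⟩
      · right; exact ⟨x, List.mem_cons_self .., h', h.2⟩
      · right; exact ⟨kg, List.mem_cons_of_mem _ hmem, heq, hp⟩
    · rw [if_neg h]
      rcases ih b with h' | ⟨kg, hmem, heq, hp⟩
      · left; exact h'
      · right; exact ⟨kg, List.mem_cons_of_mem _ hmem, heq, hp⟩

-- outer fold: bounded by any group matched at any scanned position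
lemma pvScan_le_of (cs : List Char) (n b i : Nat)
    (kg : String × Nat) (hmem : kg ∈ pvKeywordGroup)
    (hp : PySem.Chars.startswith (cs.drop i) kg.1.toList = true) (hi : i < n) :
    (List.range n).foldl (pvScanStep cs) b ≤ kg.2 := by
  induction n generalizing b with
  | zero => omega
  | succ n ih =>
    rw [List.range_succ, List.foldl_append, List.foldl_cons, List.foldl_nil]
    rcases Nat.lt_succ_iff_lt_or_eq.mp hi with h | h
    · exact le_trans (pvInner_le cs n pvKeywordGroup _) (ih b h)
    · subst h
      exact pvInner_le_of_mem cs i pvKeywordGroup _ kg hmem hp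

-- outer fold: the result is the initial value or a genuinely matched group
lemma pvScan_cases (cs : List Char) (n b : Nat) :
    (List.range n).foldl (pvScanStep cs) b = b ∨
    ∃ i < n, ∃ kg ∈ pvKeywordGroup,
      (List.range n).foldl (pvScanStep cs) b = kg.2 ∧
      PySem.Chars.startswith (cs.drop i) kg.1.toList = true := by
  induction n generalizing b with
  | zero => left; simp
  | succ n ih =>
    rw [List.range_succ, List.foldl_append, List.foldl_cons, List.foldl_nil]
    rcases ih b with h' | ⟨i, hi, kg, hmem, heq, hp⟩
    · rw [h']
      rcases pvInner_cases cs n pvKeywordGroup b with h | ⟨kg, hmem, heq, hp⟩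
      · left; exact h
      · right; exact ⟨n, Nat.lt_succ_self n, kg, hmem, heq, hp⟩
    · rcases pvInner_cases cs n pvKeywordGroup ((List.range n).foldl (pvScanStep cs) b) with h | ⟨kg', hmem', heq', hp'⟩
      · right; exact ⟨i, Nat.lt_succ_of_lt hi, kg, hmem, h.trans heq, hp⟩
      · right; exact ⟨n, Nat.lt_succ_self n, kg', hmem', heq', hp'⟩

-- substring ↔ startswith at a scanned position (for a nonempty keyword)
lemma pvIsIn_iff_exists (cs kw : List Char) (hkw : kw ≠ []) :
    PySem.Chars.isIn kw cs = true ↔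
      ∃ i < cs.length, PySem.Chars.startswith (cs.drop i) kw = true := by
  constructor
  · intro h
    rcases (PySem.Chars.exists_prefix_drop_iff_isIn kw cs).mpr h with ⟨j, hj⟩
    by_cases hjl : j < cs.length
    · exact ⟨j, hjl, (PySem.Chars.startswith_iff _ _).mpr hj⟩
    · exfalso
      rw [List.drop_eq_nil_of_le (by omega)] at hj
      exact hkw (List.prefix_nil.mp hj)
  · rintro ⟨i, _, hp⟩
    exact (PySem.Chars.exists_prefix_drop_iff_isIn kw cs).mp ⟨i, (PySem.Chars.startswith_iff _ _).mp hp⟩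

-- table facts (all decidable on the literal table)
lemma pvTable_ne_nil : ∀ kg ∈ pvKeywordGroup, kg.1.toList ≠ [] := by decide
lemma pvTable_le5 : ∀ kg ∈ pvKeywordGroup, kg.2 ≤ 5 := by decide
lemma pvTable_mem_group : ∀ kg ∈ pvKeywordGroup, kg.1 ∈ pvGroupWords kg.2 := by decide
lemma pvGroup_mem_table : ∀ j < 6, ∀ w ∈ pvGroupWords j, (w, j) ∈ pvKeywordGroup := by decide

lemma pvCond_iff (cs : List Char) (j : Nat) (hj : j < 6) :
    pvCond cs j = true ↔
      ∃ kg ∈ pvKeywordGroup, kg.2 = j ∧ PySem.Chars.isIn kg.1.toList cs = true := by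
  constructor
  · intro h
    rcases List.any_eq_true.mp h with ⟨w, hw, hin⟩
    exact ⟨(w, j), pvGroup_mem_table j hj w hw, rfl, hin⟩
  · rintro ⟨kg, hmem, hj', hin⟩
    refine List.any_eq_true.mpr ⟨kg.1, ?_, hin⟩
    rw [← hj']; exact pvTable_mem_group kg hmem

lemma pvScan_ub (cs : List Char) (j : Nat) (hj : j < 6) (h : pvCond cs j = true) :
    (List.range cs.length).foldl (pvScanStep cs) 6 ≤ j := by
  rcases (pvCond_iff cs j hj).mp h with ⟨kg, hmem, hj', hin⟩
  rcases (pvIsIn_iff_exists cs kg.1.toList (pvTable_ne_nil kg hmem)).mp hin with ⟨i, hi, hp⟩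
  rw [← hj']
  exact pvScan_le_of cs cs.length 6 i kg hmem hp hi

lemma pvScan_matched (cs : List Char) :
    (List.range cs.length).foldl (pvScanStep cs) 6 = 6 ∨
    ((List.range cs.length).foldl (pvScanStep cs) 6 ≤ 5 ∧
      pvCond cs ((List.range cs.length).foldl (pvScanStep cs) 6) = true) := by
  rcases pvScan_cases cs cs.length 6 with h | ⟨i, hi, kg, hmem, heq, hp⟩
  · left; exact h
  · right
    have h5 := pvTable_le5 kg hmem
    have hin : PySem.Chars.isIn kg.1.toList cs = true :=
      (pvIsIn_iff_exists cs kg.1.toList (pvTable_ne_nil kg hmem)).mpr ⟨i, hi, hp⟩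
    constructor
    · omega
    · rw [heq]
      exact (pvCond_iff cs kg.2 (by omega)).mpr ⟨kg, hmem, rfl, hin⟩

-- the scan computes exactly A's first-matching-group cascade
lemma pvScan_eq (cs : List Char) :
    (List.range cs.length).foldl (pvScanStep cs) 6 =
      (if pvCond cs 0 then 0 else if pvCond cs 1 then 1 else if pvCond cs 2 then 2
       else if pvCond cs 3 then 3 else if pvCond cs 4 then 4 else if pvCond cs 5 then 5 else 6) := by
  set r := (List.range cs.length).foldl (pvScanStep cs) 6 with hr
  have hmat := pvScan_matched cs
  rw [← hr] at hmat
  split_ifs with h0 h1 h2 h3 h4 h5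
  · have hub := pvScan_ub cs 0 (by omega) h0
    rw [← hr] at hub; omega
  · have hub := pvScan_ub cs 1 (by omega) h1
    rw [← hr] at hub
    rcases hmat with h6 | ⟨hle, hc⟩
    · omega
    · interval_cases r <;> simp_all
  · have hub := pvScan_ub cs 2 (by omega) h2
    rw [← hr] at hub
    rcases hmat with h6 | ⟨hle, hc⟩
    · omega
    · interval_cases r <;> simp_all
  · have hub := pvScan_ub cs 3 (by omega) h3
    rw [← hr] at hub
    rcases hmat with h6 | ⟨hle, hc⟩
    · omega
    · interval_cases r <;> simp_all
  · have hub := pvScan_ub cs 4 (by omega) h4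
    rw [← hr] at hub
    rcases hmat with h6 | ⟨hle, hc⟩
    · omega
    · interval_cases r <;> simp_all
  · have hub := pvScan_ub cs 5 (by omega) h5
    rw [← hr] at hub
    rcases hmat with h6 | ⟨hle, hc⟩
    · omega
    · interval_cases r <;> simp_all
  · rcases hmat with h6 | ⟨hle, hc⟩
    · exact h6
    · interval_cases r <;> simp_all

-- ===== VERDICT (by name: the statement is the Claim_ definition above) =====
theorem generate_examples_for_text_spec : Claim_equal_generate_examples_for_text := by
  intro text _
  unfold Spec_generate_examples_for_text generate_examples_for_text generate_examples_for_text_alt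
  simp only []
  rw [pvScan_eq]
  have e : ∀ j, j < 6 →
      ((pvGroupWords j).any (fun word => PySem.Str.isIn word (PySem.Str.lower text))) =
        pvCond (PySem.Str.lower text).toList j := by
    intro j _
    unfold pvCond
    refine PySem.List.any_congr_mem (fun w _ => ?_)
    simp [PySem.Str.isIn_eq]
  have e0 := e 0 (by omega); have e1 := e 1 (by omega); have e2 := e 2 (by omega)
  have e3 := e 3 (by omega); have e4 := e 4 (by omega); have e5 := e 5 (by omega)
  simp only [pvGroupWords] at e0 e1 e2 e3 e4 e5
  rw [e0, e1, e2, e3, e4, e5]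
  by_cases h0 : pvCond (PySem.Chars.lower text.toList) 0 = true
  · simp [h0, pvExamples]
  by_cases h1 : pvCond (PySem.Chars.lower text.toList) 1 = true
  · simp [h0, h1, pvExamples]
  by_cases h2 : pvCond (PySem.Chars.lower text.toList) 2 = true
  · simp [h0, h1, h2, pvExamples]
  by_cases h3 : pvCond (PySem.Chars.lower text.toList) 3 = true
  · simp [h0, h1, h2, h3, pvExamples]
  by_cases h4 : pvCond (PySem.Chars.lower text.toList) 4 = true
  · simp [h0, h1, h2, h3, h4, pvExamples]
  by_cases h5 : pvCond (PySem.Chars.lower text.toList) 5 = true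
  · simp [h0, h1, h2, h3, h4, h5, pvExamples]
  · simp [h0, h1, h2, h3, h4, h5]
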